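-- pv_equiv track=rewrite | github.com/jingsam/tianditu | area.py | get_rings
-- ===== SOURCE A (Python) =====
-- def get_rings(polygon):
--     rings = []
--     for part in polygon:
--         ring = []
--         for point in part:
--             if point:
--                 ring.append(point)
--             else:
--                 rings.append(ring)
--                 ring = []
--         if ring:
--             rings.append(ring)
--
--     return rings
-- ===== SOURCE B (Python) =====
-- def get_rings(polygon):
--     def rings_of(part):
--         # split at the first falsy separator: prefix ring, recurse on the rest
--         for i, point in enumerate(part):
--             if not point:
--                 return [part[:i]] + rings_of(part[i + 1:])
--         return [part] if part else []
--
--     rings = []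
--     for part in polygon:
--         rings += rings_of(part)
--     return rings
-- ===== Notes on version B (the rewrite author's own statement) =====
-- stated objective: alternative
-- what changed: A maintains one accumulator ring flushed in-place across a single pass; B recomputes each part's rings by recursion that splits the part at the first falsy separator (emit prefix, recurse on remainder), with the whole-part/empty base case.
import Mathlib
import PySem

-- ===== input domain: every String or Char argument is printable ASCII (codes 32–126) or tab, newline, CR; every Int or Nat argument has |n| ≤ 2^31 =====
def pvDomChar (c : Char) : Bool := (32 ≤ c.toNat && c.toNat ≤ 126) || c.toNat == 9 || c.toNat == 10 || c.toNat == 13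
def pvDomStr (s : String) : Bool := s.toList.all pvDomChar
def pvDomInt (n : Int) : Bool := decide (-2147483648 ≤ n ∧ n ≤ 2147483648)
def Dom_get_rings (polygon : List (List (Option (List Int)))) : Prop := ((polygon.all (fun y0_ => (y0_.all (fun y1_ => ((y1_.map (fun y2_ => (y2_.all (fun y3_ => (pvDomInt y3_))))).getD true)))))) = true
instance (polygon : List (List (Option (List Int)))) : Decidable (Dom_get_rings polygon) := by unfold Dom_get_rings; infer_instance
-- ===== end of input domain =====

-- B re-implements A by a different decomposition (recursive split at the first falsy
-- separator per part, instead of A's single accumulator loop); same cost, 'alternative'.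

-- Python truthiness of a point (None / [] are falsy); shared by both ports.
def pyTruthy (p : Option (List Int)) : Bool :=
  match p with
  | none => false
  | some xs => !xs.isEmpty

-- ===== PORT A =====
-- the body of A's inner 'for point in part' loop, acting on the state (rings, ring)
def stepA (s : List (List (List Int)) × List (List Int)) (point : Option (List Int)) :
    List (List (List Int)) × List (List Int) :=
  if pyTruthy point then (s.1, s.2 ++ [point.getD []])
  else (s.1 ++ [s.2], ([] : List (List Int)))

def get_rings (polygon : List (List (Option (List Int)))) : List (List (List Int)) :=
  polygon.foldl
    (fun rings part =>
      let st := part.foldl stepA (rings, [])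
      if st.2.isEmpty then st.1 else st.1 ++ [st.2])
    []

-- ===== PORT B =====
-- scan to the first falsy point: (prefix of truthy point values, remainder from that falsy point)
def takeRun : List (Option (List Int)) → List (List Int) × List (Option (List Int))
  | [] => ([], [])
  | p :: rest =>
    if pyTruthy p then
      let pr := takeRun rest
      (p.getD [] :: pr.1, pr.2)
    else ([], p :: rest)

lemma takeRun_snd_length (part : List (Option (List Int))) :
    (takeRun part).2.length ≤ part.length := by
  induction part with
  | nil => simp [takeRun]
  | cons p rest ih =>
    simp only [takeRun]
    split <;> simp <;> omega

-- B's rings_of: emit the prefix before the first separator, recurse on the rest;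
-- with no separator, emit the whole part iff it is non-empty
def ringsOf (part : List (Option (List Int))) : List (List (List Int)) :=
  match h : takeRun part with
  | (run, []) => if run.isEmpty then [] else [run]
  | (run, _ :: r') => run :: ringsOf r'
termination_by part.length
decreasing_by
  have hle := takeRun_snd_length part
  rw [h] at hle
  simp at hle
  omega

def get_rings_alt (polygon : List (List (Option (List Int)))) : List (List (List Int)) :=
  polygon.foldl (fun rings part => rings ++ ringsOf part) []

-- ===== PRECONDITION & SPEC =====
def Spec_get_rings (polygon : List (List (Option (List Int)))) (out : List (List (List Int))) : Prop := out = get_rings_alt polygon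
instance (polygon : List (List (Option (List Int)))) (out : List (List (List Int))) : Decidable (Spec_get_rings polygon out) := by unfold Spec_get_rings; infer_instance

-- ===== CLAIM (what is proved, stated in full; the proofs are below) =====
def Claim_equal_get_rings : Prop := ∀ (polygon : List (List (Option (List Int)))), Dom_get_rings polygon → Spec_get_rings polygon (get_rings polygon)

-- ===== LEMMAS AND PROOFS =====

-- A-shaped per-part recursion: rings produced from pending ring 'acc' and remaining points
def ringsFrom (acc : List (List Int)) : List (Option (List Int)) → List (List (List Int))
  | [] => if acc.isEmpty then [] else [acc]
  | p :: rest =>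
    if pyTruthy p then ringsFrom (acc ++ [p.getD []]) rest
    else acc :: ringsFrom [] rest

-- A's inner loop + final flush equals ringsFrom
lemma foldA_eq_ringsFrom (part : List (Option (List Int)))
    (rings : List (List (List Int))) (acc : List (List Int)) :
    (let st := part.foldl stepA (rings, acc)
     if st.2.isEmpty then st.1 else st.1 ++ [st.2]) = rings ++ ringsFrom acc part := by
  induction part generalizing rings acc with
  | nil =>
    simp only [List.foldl, ringsFrom]
    by_cases h : acc.isEmpty <;> simp [h]
  | cons p rest ih =>
    simp only [List.foldl, ringsFrom, stepA]
    by_cases h : pyTruthy p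
    · simpa [h] using ih rings (acc ++ [p.getD []])
    · simpa [h] using ih (rings ++ [acc]) []

-- unfolding ringsFrom through takeRun's split
lemma ringsFrom_takeRun (part : List (Option (List Int))) (acc : List (List Int)) :
    ringsFrom acc part =
      match takeRun part with
      | (run, []) => if (acc ++ run).isEmpty then [] else [acc ++ run]
      | (run, _ :: r') => (acc ++ run) :: ringsFrom [] r' := by
  induction part generalizing acc with
  | nil => simp [takeRun, ringsFrom]
  | cons p rest ih =>
    by_cases h : pyTruthy p
    · simp only [ringsFrom, takeRun, h, if_pos]
      rw [ih (acc ++ [p.getD []])]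
      rcases hr : takeRun rest with ⟨run, rem⟩
      cases rem <;> simp
    · simp [ringsFrom, takeRun, h]

lemma ringsOf_eq_ringsFrom (part : List (Option (List Int))) :
    ringsOf part = ringsFrom [] part := by
  induction hn : part.length using Nat.strong_induction_on generalizing part with
  | _ n ih =>
    rw [ringsOf, ringsFrom_takeRun]
    rcases hr : takeRun part with ⟨run, rem⟩
    cases rem with
    | nil => simp
    | cons q r' =>
      have hle := takeRun_snd_length part
      rw [hr] at hle
      simp only [List.nil_append]
      rw [ih r'.length (by simp at hle; omega) r' rfl]

-- ===== VERDICT (by name: the statement is the Claim_ definition above) =====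
lemma get_rings_eq (polygon : List (List (Option (List Int)))) :
    get_rings polygon = get_rings_alt polygon := by
  unfold get_rings get_rings_alt
  induction polygon using List.reverseRecOn with
  | nil => rfl
  | append_singleton xs part ih =>
    rw [List.foldl_append, List.foldl_append, ih]
    simp only [List.foldl]
    rw [foldA_eq_ringsFrom, ringsOf_eq_ringsFrom]

theorem get_rings_spec : Claim_equal_get_rings :=
  fun polygon _ => get_rings_eq polygon
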